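-- pv_equiv track=rewrite | github.com/mnur53/code_jam | 2018/Qualification/1_saving_the_universe/func.py | calculate_number_hacks
-- ===== SOURCE A (Python) =====
-- def calculate_number_hacks(d, current_dmg, hack_efficiencies):
--
--     nodes_after = 0
--     num_hacks = 0
--
--     for node in reversed(hack_efficiencies):
--         for hack_efficiency in reversed(node):
--
--             current_dmg -= hack_efficiency
--             num_hacks += 1
--
--             if current_dmg <= d:
--                 return num_hacks
--
--             for i in range(0, nodes_after):
--                 current_dmg -= hack_efficiency
--                 num_hacks += 1
--                 if current_dmg <= d:
--                     return num_hacks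
--
--         nodes_after += 1
--
--     return -1
-- ===== SOURCE B (Python) =====
-- def calculate_number_hacks(d, current_dmg, hack_efficiencies):
--     num_hacks = 0
--     for i, node in enumerate(reversed(hack_efficiencies)):
--         k = i + 1  # each efficiency in this node is subtracted k times
--         for e in reversed(node):
--             if current_dmg - e <= d:
--                 return num_hacks + 1
--             if e > 0:
--                 t = -((d - current_dmg) // e)  # ceil((current_dmg - d) / e)
--                 if t <= k:
--                     return num_hacks + t
--             current_dmg -= k * e
--             num_hacks += k
--     return -1
-- ===== Notes on version B (the rewrite author's own statement) =====
-- stated objective: alternative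
-- what changed: A simulates every subtraction one by one (an inner range(nodes_after) loop per efficiency); B resolves each efficiency's k repeated subtractions with one ceiling division, removing the inner repetition loop (a single pass over the efficiencies).
import Mathlib
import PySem

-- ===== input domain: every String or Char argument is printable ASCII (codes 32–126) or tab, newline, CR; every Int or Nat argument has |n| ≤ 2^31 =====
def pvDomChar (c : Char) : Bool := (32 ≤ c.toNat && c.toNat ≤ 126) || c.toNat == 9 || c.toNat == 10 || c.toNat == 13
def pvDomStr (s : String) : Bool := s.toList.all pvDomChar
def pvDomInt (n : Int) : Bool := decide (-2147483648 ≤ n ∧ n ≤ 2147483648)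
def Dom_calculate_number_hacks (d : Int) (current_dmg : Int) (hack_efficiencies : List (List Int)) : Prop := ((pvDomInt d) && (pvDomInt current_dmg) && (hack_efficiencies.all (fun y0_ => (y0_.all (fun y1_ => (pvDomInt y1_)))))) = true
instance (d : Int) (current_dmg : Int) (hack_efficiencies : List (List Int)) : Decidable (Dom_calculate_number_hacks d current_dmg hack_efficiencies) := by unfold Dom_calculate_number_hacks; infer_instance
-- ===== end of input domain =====

-- B replaces A's step-by-step repeated subtraction (an inner range(nodes_after) loop per
-- efficiency) by one ceiling division per efficiency: the inner repetition loop disappears.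

-- ===== PORT A =====
-- the 'for i in range(0, nodes_after)' loop: n more subtractions of e with the check after each
def pvAInner (d e : Int) : Nat → Int → Int → (Int × Int) ⊕ Int
  | 0, dmg, hacks => .inl (dmg, hacks)
  | n + 1, dmg, hacks =>
    let dmg' := dmg - e
    let hacks' := hacks + 1
    if dmg' ≤ d then .inr hacks' else pvAInner d e n dmg' hacks'

-- the 'for hack_efficiency in reversed(node)' loop (argument already reversed)
def pvANode (d : Int) (na : Nat) : List Int → Int → Int → (Int × Int) ⊕ Int
  | [], dmg, hacks => .inl (dmg, hacks)
  | e :: rest, dmg, hacks =>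
    let dmg' := dmg - e
    let hacks' := hacks + 1
    if dmg' ≤ d then .inr hacks'
    else
      match pvAInner d e na dmg' hacks' with
      | .inr r => .inr r
      | .inl (dmg2, h2) => pvANode d na rest dmg2 h2

-- the 'for node in reversed(hack_efficiencies)' loop (argument already reversed)
def pvAOuter (d : Int) : List (List Int) → Nat → Int → Int → Int
  | [], _, _, _ => -1
  | node :: rest, na, dmg, hacks =>
    match pvANode d na node.reverse dmg hacks with
    | .inr r => r
    | .inl (dmg2, h2) => pvAOuter d rest (na + 1) dmg2 h2

def calculate_number_hacks (d : Int) (current_dmg : Int) (hack_efficiencies : List (List Int)) : Int :=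
  pvAOuter d hack_efficiencies.reverse 0 current_dmg 0

-- ===== PORT B =====
-- one efficiency = k subtractions of e, resolved by a ceiling division instead of a loop
def pvBNode (d k : Int) : List Int → Int → Int → (Int × Int) ⊕ Int
  | [], dmg, hacks => .inl (dmg, hacks)
  | e :: rest, dmg, hacks =>
    if dmg - e ≤ d then .inr (hacks + 1)
    else if 0 < e then
      let t := -(PySem.Int.floordiv (d - dmg) e)   -- ceil((dmg - d) / e), as Source B computes it
      if t ≤ k then .inr (hacks + t)
      else pvBNode d k rest (dmg - k * e) (hacks + k)
    else pvBNode d k rest (dmg - k * e) (hacks + k)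

def pvBOuter (d : Int) : List (List Int) → Int → Int → Int → Int
  | [], _, _, _ => -1
  | node :: rest, k, dmg, hacks =>
    match pvBNode d k node.reverse dmg hacks with
    | .inr r => r
    | .inl (dmg2, h2) => pvBOuter d rest (k + 1) dmg2 h2

def calculate_number_hacks_alt (d : Int) (current_dmg : Int) (hack_efficiencies : List (List Int)) : Int :=
  pvBOuter d hack_efficiencies.reverse 1 current_dmg 0

-- ===== PRECONDITION & SPEC =====
def Spec_calculate_number_hacks (d : Int) (current_dmg : Int) (hack_efficiencies : List (List Int)) (out : Int) : Prop := out = calculate_number_hacks_alt d current_dmg hack_efficiencies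
instance (d : Int) (current_dmg : Int) (hack_efficiencies : List (List Int)) (out : Int) : Decidable (Spec_calculate_number_hacks d current_dmg hack_efficiencies out) := by unfold Spec_calculate_number_hacks; infer_instance

-- ===== CLAIM (what is proved, stated in full; the proofs are below) =====
def Claim_equal_calculate_number_hacks : Prop := ∀ (d : Int) (current_dmg : Int) (hack_efficiencies : List (List Int)), Dom_calculate_number_hacks d current_dmg hack_efficiencies → Spec_calculate_number_hacks d current_dmg hack_efficiencies (calculate_number_hacks d current_dmg hack_efficiencies)

-- ===== LEMMAS AND PROOFS =====

theorem pv_floordiv_add_self (x e : Int) (he : 0 < e) :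
    PySem.Int.floordiv (x + e) e = PySem.Int.floordiv x e + 1 := by
  have h := (PySem.Int.floordiv_eq_iff_of_pos (a := x) (b := e)
    (q := PySem.Int.floordiv x e) he).mp rfl
  exact (PySem.Int.floordiv_eq_iff_of_pos he).mpr (by constructor <;> nlinarith [h.1, h.2])

-- closed form of A's inner repetition loop, entered with dmg > d
theorem pvAInner_char (d e : Int) (n : Nat) (dmg hacks : Int) (h : d < dmg) :
    pvAInner d e n dmg hacks =
      if 0 < e ∧ -(PySem.Int.floordiv (d - dmg) e) ≤ (n : Int) then
        .inr (hacks + -(PySem.Int.floordiv (d - dmg) e))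
      else .inl (dmg - n * e, hacks + n) := by
  induction n generalizing dmg hacks with
  | zero =>
    simp only [pvAInner, Nat.cast_zero, zero_mul, sub_zero, add_zero]
    rw [if_neg]
    rintro ⟨he, ht⟩
    have hrw : d - dmg = -(dmg - d) := by ring
    rw [hrw] at ht
    have hb := (PySem.Int.neg_floordiv_neg_eq_iff_of_pos (a := dmg - d) (b := e)
      (q := -(PySem.Int.floordiv (-(dmg - d)) e)) he).mp rfl
    nlinarith [hb.1, hb.2]
  | succ n ih =>
    simp only [pvAInner]
    by_cases hd : dmg - e ≤ d
    · -- crossing at this subtraction: the ceiling is 1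
      have he : 0 < e := by omega
      have ht1 : -(PySem.Int.floordiv (d - dmg) e) = 1 := by
        rw [show d - dmg = -(dmg - d) from by ring]
        exact (PySem.Int.neg_floordiv_neg_eq_iff_of_pos he).mpr (by constructor <;> nlinarith)
      rw [if_pos hd, if_pos ⟨he, by rw [ht1]; push_cast; omega⟩, ht1]
    · rw [if_neg hd, ih (dmg - e) (hacks + 1) (by omega)]
      by_cases he : 0 < e
      · have hs : -(PySem.Int.floordiv (d - dmg) e)
            = -(PySem.Int.floordiv (d - (dmg - e)) e) + 1 := by
          rw [show d - (dmg - e) = d - dmg + e from by ring, pv_floordiv_add_self _ _ he]; ring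
        by_cases ht : -(PySem.Int.floordiv (d - (dmg - e)) e) ≤ (n : Int)
        · rw [if_pos ⟨he, ht⟩, if_pos ⟨he, by rw [hs]; push_cast; omega⟩, hs]
          congr 1; ring
        · rw [if_neg (by rintro ⟨_, h2⟩; exact ht h2),
              if_neg (by rintro ⟨_, h2⟩; rw [hs] at h2; push_cast at h2; exact ht (by omega))]
          simp only [Sum.inl.injEq, Prod.mk.injEq]
          constructor <;> push_cast <;> ring
      · rw [if_neg (by rintro ⟨h1, _⟩; exact he h1),
            if_neg (by rintro ⟨h1, _⟩; exact he h1)]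
        simp only [Sum.inl.injEq, Prod.mk.injEq]
        constructor <;> push_cast <;> ring

theorem pvNode_eq (d : Int) (na : Nat) (es : List Int) (dmg hacks : Int) :
    pvANode d na es dmg hacks = pvBNode d ((na : Int) + 1) es dmg hacks := by
  induction es generalizing dmg hacks with
  | nil => rfl
  | cons e rest ih =>
    simp only [pvANode, pvBNode]
    by_cases hd : dmg - e ≤ d
    · rw [if_pos hd, if_pos hd]
    · rw [if_neg hd, if_neg hd, pvAInner_char d e na (dmg - e) (hacks + 1) (by omega)]
      by_cases he : 0 < e
      · have hs : -(PySem.Int.floordiv (d - dmg) e)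
            = -(PySem.Int.floordiv (d - (dmg - e)) e) + 1 := by
          rw [show d - (dmg - e) = d - dmg + e from by ring, pv_floordiv_add_self _ _ he]; ring
        rw [if_pos he]
        by_cases ht : -(PySem.Int.floordiv (d - (dmg - e)) e) ≤ (na : Int)
        · rw [if_pos ⟨he, ht⟩,
              if_pos (show -(PySem.Int.floordiv (d - dmg) e) ≤ (na : Int) + 1 from by
                rw [hs]; omega)]
          dsimp only
          rw [hs]; congr 1; ring
        · rw [if_neg (by rintro ⟨_, h2⟩; exact ht h2),
              if_neg (show ¬ -(PySem.Int.floordiv (d - dmg) e) ≤ (na : Int) + 1 from by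
                rw [hs]; omega)]
          dsimp only
          rw [show dmg - e - (na : Int) * e = dmg - ((na : Int) + 1) * e from by ring,
              show hacks + 1 + (na : Int) = hacks + ((na : Int) + 1) from by ring, ih]
      · rw [if_neg (by rintro ⟨h1, _⟩; exact he h1), if_neg he]
        dsimp only
        rw [show dmg - e - (na : Int) * e = dmg - ((na : Int) + 1) * e from by ring,
            show hacks + 1 + (na : Int) = hacks + ((na : Int) + 1) from by ring, ih]

theorem pvOuter_eq (d : Int) (nodes : List (List Int)) (na : Nat) (dmg hacks : Int) :
    pvAOuter d nodes na dmg hacks = pvBOuter d nodes ((na : Int) + 1) dmg hacks := by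
  induction nodes generalizing na dmg hacks with
  | nil => rfl
  | cons node rest ih =>
    simp only [pvAOuter, pvBOuter, pvNode_eq d na node.reverse dmg hacks]
    cases pvBNode d ((na : Int) + 1) node.reverse dmg hacks with
    | inr r => rfl
    | inl p =>
      obtain ⟨dmg2, h2⟩ := p
      have h := ih (na + 1) dmg2 h2
      push_cast at h
      exact h

-- ===== VERDICT (by name: the statement is the Claim_ definition above) =====
theorem calculate_number_hacks_spec : Claim_equal_calculate_number_hacks := by
  intro d dmg hs _
  unfold Spec_calculate_number_hacks calculate_number_hacks calculate_number_hacks_alt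
  simpa using pvOuter_eq d hs.reverse 0 dmg 0
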